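-- pv_equiv track=rewrite | github.com/milnepe/radiopi | radiopi/countries.py | get_countries
-- ===== SOURCE A (Python) =====
-- def get_countries(cities: list) -> dict:
--     """Returns a dict of country: [list_of_cities] for all cities
--     in a cities list. US uses COUNTRY-STATE format"""
--     countries = dict()
--     for c in cities:
--         country = c.split(',')  # last part is country / country-state
--         if country[1] not in countries:
--             countries[country[1]] = [c]
--         else:
--             countries[country[1]].append(c)
--     return countries
-- ===== SOURCE B (Python) =====
-- def get_countries(cities: list) -> dict:
--     """Returns a dict of country: [list_of_cities] for all cities
--     in a cities list. US uses COUNTRY-STATE format"""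
--     keys = dict.fromkeys(c.split(',')[1] for c in cities)
--     return {k: [c for c in cities if c.split(',')[1] == k] for k in keys}
-- ===== Notes on version B (the rewrite author's own statement) =====
-- stated objective: idiomatic
-- what changed: Replaces the incremental dict-of-growing-lists loop by a two-pass comprehension: collect the ordered distinct country keys with dict.fromkeys, then build each group with a filter over the whole list.
import Mathlib
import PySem

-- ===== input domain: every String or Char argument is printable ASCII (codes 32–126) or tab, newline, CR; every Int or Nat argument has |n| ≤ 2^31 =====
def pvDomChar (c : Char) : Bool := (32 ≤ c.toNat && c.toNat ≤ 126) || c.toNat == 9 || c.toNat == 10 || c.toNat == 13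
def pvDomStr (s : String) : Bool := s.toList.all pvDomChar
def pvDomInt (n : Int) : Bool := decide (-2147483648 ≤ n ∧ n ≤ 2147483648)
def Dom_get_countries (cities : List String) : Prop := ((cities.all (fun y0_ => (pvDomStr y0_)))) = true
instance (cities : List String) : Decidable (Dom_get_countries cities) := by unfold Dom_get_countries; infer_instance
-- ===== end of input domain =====

-- B: instead of A's incremental dict-of-growing-lists loop, collect the ordered distinct
-- country keys once and build each group by filtering the list (idiomatic two-pass; return
-- value only — neither version mutates its argument).


-- ===== PORT A =====
-- c.split(',')[1]; Pre_ guarantees the index is in range, so the `.getD ""` default is never hit there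
def pvKey (c : String) : String :=
  (PySem.List.pyGet? ((PySem.Str.split? c ",").getD []) 1).getD ""

def get_countries (cities : List String) : List (String × List String) :=
  (cities.foldl (fun countries c =>
      let k := pvKey c
      if countries.contains k = false then countries.insert k [c]
      else countries.modify k [] (fun v => v ++ [c]))
    PySem.Dict.empty).items

-- ===== PORT B =====
def get_countries_alt (cities : List String) : List (String × List String) :=
  let keys := PySem.List.dedup (cities.map pvKey)
  keys.map (fun k => (k, cities.filter (fun c => pvKey c == k)))

-- ===== PRECONDITION & SPEC =====
-- Pre_ excludes inputs where some city has no comma: there c.split(',')[1] raises IndexError in A (and in B).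
def Pre_get_countries (cities : List String) : Prop :=
  ∀ c ∈ cities, 2 ≤ ((PySem.Str.split? c ",").getD []).length
instance (cities : List String) : Decidable (Pre_get_countries cities) := by unfold Pre_get_countries; infer_instance

def pvWitness_get_countries : List String := ["London,GB", "Paris,FR", "Leeds,GB"]

def Spec_get_countries (cities : List String) (out : List (String × List String)) : Prop := out = get_countries_alt cities
instance (cities : List String) (out : List (String × List String)) : Decidable (Spec_get_countries cities out) := by unfold Spec_get_countries; infer_instance

-- ===== CLAIM (what is proved, stated in full; the proofs are below) =====
def Claim_equal_get_countries : Prop := ∀ (cities : List String), Dom_get_countries cities → Pre_get_countries cities → Spec_get_countries cities (get_countries cities)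

-- ===== LEMMAS AND PROOFS =====

-- A's branching step is exactly a single Dict.modify (append to the group, [] when fresh)
theorem pv_step_eq (d : PySem.Dict String (List String)) (c : String) :
    (if d.contains (pvKey c) = false then d.insert (pvKey c) [c]
     else d.modify (pvKey c) [] (fun v => v ++ [c]))
    = d.modify (pvKey c) [] (fun v => v ++ [c]) := by
  by_cases h : d.contains (pvKey c) = false
  · simp [h, PySem.Dict.modify, PySem.Dict.getD_of_not_contains _ _ h]
  · simp [h]

theorem pv_filter_map_key (cities : List String) (k : String) :
    ((cities.map (fun c => (pvKey c, c))).filter (fun p => p.1 == k)).map (fun p => p.2)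
    = cities.filter (fun c => pvKey c == k) := by
  induction cities with
  | nil => rfl
  | cons c cs ih =>
    by_cases h : pvKey c == k <;> simp_all [List.map_cons]

-- ===== VERDICT (by name: the statement is the Claim_ definition above) =====
theorem get_countries_spec : Claim_equal_get_countries := by
  intro cities _ _
  unfold Spec_get_countries get_countries get_countries_alt
  have hstep : (cities.foldl (fun countries c =>
      let k := pvKey c
      if countries.contains k = false then countries.insert k [c]
      else countries.modify k [] (fun v => v ++ [c])) PySem.Dict.empty)
      = (cities.map (fun c => (pvKey c, c))).foldl
          (fun d p => d.modify p.1 [] (fun v => v ++ [p.2])) PySem.Dict.empty := by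
    rw [List.foldl_map]
    exact List.foldl_ext _ _ _ (fun d c _ => pv_step_eq d c)
  rw [hstep]
  set l := cities.map (fun c => (pvKey c, c)) with hl
  set D := l.foldl (fun d p => d.modify p.1 [] (fun v => v ++ [p.2])) PySem.Dict.empty with hD
  have hnodup : D.keys.Nodup := by
    rw [hD]
    exact PySem.Dict.nodup_keys_foldl_modify_key l (·.1) [] (fun d p v => v ++ [p.2])
      PySem.Dict.empty (by simp)
  have hkeys : D.keys = PySem.List.dedup (cities.map pvKey) := by
    rw [hD]
    rw [PySem.Dict.keys_foldl_modify_key]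
    simp only [hl, List.map_map]
    rfl
  rw [PySem.Dict.items_eq_map_keys D hnodup [], hkeys]
  apply List.map_congr_left
  intro k _
  have hgetD : D.getD k [] = cities.filter (fun c => pvKey c == k) := by
    rw [hD, PySem.Dict.getD_foldl_modify_append, hl, pv_filter_map_key]
    simp [PySem.Dict.getD_empty]
  rw [hgetD]
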